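-- pv_equiv track=rewrite | github.com/Tishka17/aiogram_dialog | aiogram_dialog/manager/stack.py | id_to_str
-- ===== SOURCE A (Python) =====
-- import string
--
-- ID_SYMS = string.digits + string.ascii_letters
--
-- def id_to_str(int_id: int) -> str:
--     if not int_id:
--         return ID_SYMS[0]
--     base = len(ID_SYMS)
--     res = ""
--     while int_id:
--         int_id, mod = divmod(int_id, base)
--         res += ID_SYMS[mod]
--     return res
-- ===== SOURCE B (Python) =====
-- import string
--
-- ID_SYMS = string.digits + string.ascii_letters
--
-- def id_to_str(int_id: int) -> str:
--     if not int_id: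
--         return ID_SYMS[0]
--     base = len(ID_SYMS)
--     k = 1
--     while base ** k <= int_id:
--         k += 1
--     return "".join(ID_SYMS[int_id // base ** i % base] for i in range(k))
-- ===== Notes on version B (the rewrite author's own statement) =====
-- stated objective: alternative
-- what changed: A's mutating divmod/accumulator loop is replaced by a positional formula: first count the digits k (smallest k with 62**k > int_id), then build the string directly as ID_SYMS[int_id // 62**i % 62] for i in range(k), with no mutation of int_id.
import Mathlib
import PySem

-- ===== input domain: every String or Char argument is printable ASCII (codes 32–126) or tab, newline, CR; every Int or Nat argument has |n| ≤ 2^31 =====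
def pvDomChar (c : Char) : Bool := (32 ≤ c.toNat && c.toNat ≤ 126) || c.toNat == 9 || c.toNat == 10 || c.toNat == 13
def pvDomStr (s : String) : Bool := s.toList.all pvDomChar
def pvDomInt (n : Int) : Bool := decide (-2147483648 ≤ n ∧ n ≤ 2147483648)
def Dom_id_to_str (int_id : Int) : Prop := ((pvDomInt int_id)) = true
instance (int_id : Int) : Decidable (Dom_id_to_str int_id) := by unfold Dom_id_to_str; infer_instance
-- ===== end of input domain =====

-- B replaces A's mutating divmod/accumulator loop by a positional formula: find the digit
-- count k, then read digit i directly as ID_SYMS[n // 62**i % 62] over range(k)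
-- (objective: alternative decomposition, same cost).

-- ID_SYMS = string.digits + string.ascii_letters
def idSyms : List Char :=
  "0123456789abcdefghijklmnopqrstuvwxyzABCDEFGHIJKLMNOPQRSTUVWXYZ".toList

-- ===== PORT A =====
-- the 'while int_id:' loop; the guard '0 < n' makes the port total (Python diverges
-- for negative int_id, which Pre_ excludes; for int_id ≥ 0 the guard equals 'int_id ≠ 0')
def idLoopA (n : Int) (res : List Char) : List Char :=
  if h : 0 < n then
    idLoopA (PySem.Int.floordiv n 62) (res ++ [PySem.List.pyGetD idSyms (PySem.Int.mod n 62) '?'])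
  else res
termination_by n.toNat
decreasing_by
  simp only [PySem.Int.floordiv_eq_ediv_of_pos (by norm_num : (0:Int) < 62)]
  omega

def id_to_str (int_id : Int) : String :=
  if int_id = 0 then String.mk [PySem.List.pyGetD idSyms 0 '?']
  else String.mk (idLoopA int_id [])

-- ===== PORT B =====
-- the 'while base ** k <= int_id: k += 1' counter; k only ever counts upward from 1,
-- so it is carried as a Nat (its Python value is the same nonnegative integer); the
-- guard is total: for int_id ≤ 0 it is False at once, as in Python, and the loop stops
def idLenB (n : Int) (k : Nat) : Nat :=
  if h : (62:Int) ^ k ≤ n then idLenB n (k + 1) else k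
termination_by (n - k).toNat
decreasing_by
  have hkn : k < 62 ^ k := Nat.lt_pow_self (by norm_num)
  have hk : (k : Int) < (62:Int) ^ k := by
    calc (k : Int) < ((62 ^ k : Nat) : Int) := by exact_mod_cast hkn
    _ = (62:Int) ^ k := by push_cast; ring
  omega

-- ''.join(ID_SYMS[int_id // base ** i % base] for i in range(k)); every i drawn from
-- range(k) is ≥ 0, so the Python exponent i is exactly i.toNat
def id_to_str_alt (int_id : Int) : String :=
  if int_id = 0 then String.mk [PySem.List.pyGetD idSyms 0 '?']
  else
    String.mk ((PySem.List.pyRange 0 (idLenB int_id 1) 1).map (fun i =>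
      PySem.List.pyGetD idSyms
        (PySem.Int.mod (PySem.Int.floordiv int_id ((62:Int) ^ i.toNat)) 62) '?'))

-- ===== PRECONDITION & SPEC =====
-- Pre_ excludes negative int_id, on which A's 'while int_id:' loop never terminates
-- (Python floor-division keeps a negative int_id negative forever), so A returns no value there.
def Pre_id_to_str (int_id : Int) : Prop := 0 ≤ int_id
instance (int_id : Int) : Decidable (Pre_id_to_str int_id) := by unfold Pre_id_to_str; infer_instance

def pvWitness_id_to_str : Int := (137)

def Spec_id_to_str (int_id : Int) (out : String) : Prop := out = id_to_str_alt int_id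
instance (int_id : Int) (out : String) : Decidable (Spec_id_to_str int_id out) := by unfold Spec_id_to_str; infer_instance

-- ===== CLAIM (what is proved, stated in full; the proofs are below) =====
def Claim_equal_id_to_str : Prop := ∀ (int_id : Int), Dom_id_to_str int_id → Pre_id_to_str int_id → Spec_id_to_str int_id (id_to_str int_id)

-- ===== LEMMAS AND PROOFS =====

-- reference digit string (little-endian), over Nat
def drefN (m : Nat) : List Char :=
  if h : m = 0 then []
  else PySem.List.pyGetD idSyms ((m % 62 : Nat) : Int) '?' :: drefN (m / 62)
termination_by m
decreasing_by omega

-- A's loop produces the reference digits after the accumulator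
theorem idLoopA_eq (m : Nat) (res : List Char) : idLoopA (m : Int) res = res ++ drefN m := by
  rw [idLoopA, drefN]
  by_cases h : m = 0
  · simp [h]
  · have h0 : (0:Int) < (m:Int) := by omega
    have hd : PySem.Int.floordiv (m : Int) 62 = ((m / 62 : Nat) : Int) := by
      exact_mod_cast PySem.Int.floordiv_natCast m 62
    have hm : PySem.Int.mod (m : Int) 62 = ((m % 62 : Nat) : Int) := by
      exact_mod_cast PySem.Int.mod_natCast m 62
    rw [dif_pos h0, dif_neg h, hd, hm, idLoopA_eq (m / 62)]
    simp
termination_by m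
decreasing_by omega

-- idLenB's result bounds m: it is the least k' ≥ k with m < 62^k'
theorem idLenB_spec (m : Nat) (k : Nat) (hm : 62 ^ (k - 1) ≤ m) (hk : 1 ≤ k) :
    m < 62 ^ (idLenB (m : Int) k) ∧ 62 ^ (idLenB (m : Int) k - 1) ≤ m := by
  rw [idLenB]
  by_cases h : (62:Int) ^ k ≤ (m : Int)
  · have h' : 62 ^ k ≤ m := by exact_mod_cast h
    rw [dif_pos h]
    exact idLenB_spec m (k + 1) (by simpa using h') (by omega)
  · have h' : m < 62 ^ k := by
      by_contra hc
      exact h (by exact_mod_cast not_lt.mp hc)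
    rw [dif_neg h]
    exact ⟨h', hm⟩
termination_by ((m : Int) - k).toNat
decreasing_by
  have hkn : k < 62 ^ k := Nat.lt_pow_self (by norm_num)
  have hkp : (k : Int) < (62:Int) ^ k := by
    calc (k : Int) < ((62 ^ k : Nat) : Int) := by exact_mod_cast hkn
    _ = (62:Int) ^ k := by push_cast; ring
  omega

-- the positional formula over range(k) yields exactly the reference digits,
-- provided 62^(k-1) ≤ m < 62^k
theorem mapRange_eq_drefN (k : Nat) : ∀ (m : Nat), 0 < m → m < 62 ^ k → 62 ^ (k - 1) ≤ m →
    (PySem.List.pyRange 0 (k : Int) 1).map (fun i =>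
      PySem.List.pyGetD idSyms
        (PySem.Int.mod (PySem.Int.floordiv (m : Int) ((62:Int) ^ i.toNat)) 62) '?') = drefN m := by
  induction k with
  | zero => intro m hm hub _; omega
  | succ k ih =>
    intro m hm hub hlb
    have hcons : PySem.List.pyRange 0 ((k:Int) + 1) 1 =
        PySem.List.pyRange 0 (k:Int) 1 ++ [(k:Int)] :=
      PySem.List.pyRange_one_succ_right (by omega)
    have hmod : PySem.Int.mod ((m / 62 ^ 0 : Nat) : Int) 62 = ((m % 62 : Nat) : Int) := by
      simpa using (PySem.Int.mod_natCast m 62)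
    rcases Nat.eq_zero_or_pos k with hk0 | hkpos
    · -- single digit: m < 62
      subst hk0
      have hm62 : m < 62 := by simpa using hub
      have hsing := PySem.List.pyRange_one_singleton (0:Int)
      norm_num at hsing
      rw [drefN, dif_neg (by omega)]
      push_cast
      rw [hsing]
      simp only [List.map_cons, List.map_nil]
      rw [show PySem.Int.floordiv (m:Int) ((62:Int) ^ (0:Int).toNat) = (m:Int) by simp]
      rw [show PySem.Int.mod (m:Int) 62 = ((m % 62 : Nat) : Int) from
        Eq.trans (PySem.Int.mod_natCast m 62) (by norm_num)]
      rw [drefN, dif_pos (show m / 62 = 0 by omega)]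
      push_cast
      rfl
    · -- k ≥ 1: peel the last index?  No — peel the FIRST index and recurse on m / 62
      have hshift : PySem.List.pyRange 0 ((k:Int) + 1) 1 = (0:Int) :: PySem.List.pyRange 1 ((k:Int)+1) 1 :=
        PySem.List.pyRange_one_cons (by omega)
      have hrange : PySem.List.pyRange 1 ((k:Int)+1) 1 =
          (PySem.List.pyRange 0 (k:Int) 1).map (fun j => j + 1) := by
        rw [PySem.List.pyRange_one, PySem.List.pyRange_one, List.map_map]
        have h1 : (((k:Int)+1) - 1).toNat = k := by omega
        have h2 : (((k:Int)) - 0).toNat = k := by omega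
        rw [h1, h2]
        apply List.map_congr_left
        intro a _
        simp
        omega
      have hdivstep : ∀ j : Nat,
          PySem.Int.floordiv (m : Int) ((62:Int) ^ (j + 1)) =
          PySem.Int.floordiv ((m / 62 : Nat) : Int) ((62:Int) ^ j) := by
        intro j
        have h1 : ((62:Int) ^ (j+1)) = (((62 ^ (j+1) : Nat)) : Int) := by push_cast; ring
        have h2 : ((62:Int) ^ j) = (((62 ^ j : Nat)) : Int) := by push_cast; ring
        rw [h1, h2, PySem.Int.floordiv_natCast, PySem.Int.floordiv_natCast]
        norm_cast
        rw [Nat.div_div_eq_div_mul]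
        congr 1
        ring
      have hm' : 0 < m / 62 := by
        have : 62 ^ 1 ≤ m := le_trans (Nat.pow_le_pow_right (by norm_num) (by omega)) hlb
        exact Nat.div_pos (by simpa using this) (by norm_num)
      have hub' : m / 62 < 62 ^ k := by
        have hlt : m < 62 * 62 ^ k := by
          calc m < 62 ^ (k+1) := hub
          _ = 62 * 62 ^ k := by ring
        exact Nat.div_lt_of_lt_mul hlt
      have hlb' : 62 ^ (k - 1) ≤ m / 62 := by
        have h62 : 62 ^ (k-1) * 62 ≤ m := by
          calc 62 ^ (k-1) * 62 = 62 ^ (k-1+1) := by ring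
          _ = 62 ^ k := by congr 1; omega
          _ = 62 ^ ((k+1) - 1) := by congr 1
          _ ≤ m := hlb
        exact Nat.le_div_iff_mul_le (by norm_num) |>.mpr h62
      push_cast
      rw [hshift, hrange]
      simp only [List.map_cons, List.map_map, Function.comp_def]
      have hd0 : PySem.Int.floordiv (m : Int) ((62:Int) ^ (0:Int).toNat) = (m : Int) := by
        have := PySem.Int.floordiv_eq_ediv_of_pos (show (0:Int) < 1 by norm_num) (a := (m:Int))
        simpa using this
      rw [drefN, dif_neg (by omega)]
      congr 1
      · rw [hd0]
        congr 1
        exact_mod_cast PySem.Int.mod_natCast m 62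
      · rw [← ih (m / 62) hm' hub' hlb']
        apply List.map_congr_left
        intro j hj
        have hj0 : 0 ≤ j := ((PySem.List.mem_pyRange_one).mp hj).1
        have : (j + 1).toNat = j.toNat + 1 := by omega
        simp only [this, hdivstep j.toNat]

-- ===== VERDICT (by name: the statement is the Claim_ definition above) =====
theorem id_to_str_spec : Claim_equal_id_to_str := by
  intro n _ hpre
  have hpre' : 0 ≤ n := hpre
  unfold Spec_id_to_str id_to_str id_to_str_alt
  by_cases h0 : n = 0
  · simp [h0]
  · rw [if_neg h0, if_neg h0]
    obtain ⟨m, rfl⟩ : ∃ m : Nat, n = (m : Int) := ⟨n.toNat, by omega⟩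
    have hm : 0 < m := by omega
    have hspec := idLenB_spec m 1 (by simpa using hm) (by omega)
    rw [idLoopA_eq m []]
    rw [mapRange_eq_drefN (idLenB (m : Int) 1) m hm hspec.1 hspec.2]
    simp
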